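-- pv_equiv track=rewrite | github.com/oresttokovenko/advent_of_code | 2018/day_02/part_1.py | warehouse_search
-- ===== SOURCE A (Python) =====
-- from collections import Counter
-- from collections.abc import Sequence
-- from typing import Literal
--
-- def warehouse_search(input: Sequence, num_letters: Literal[2, 3]):
--     multiples = 0
--     for i in input:
--         counter = Counter(i)
--         values = set(counter.values())
--         if num_letters in values:
--             multiples += 1
--     return multiples
-- ===== SOURCE B (Python) =====
-- def warehouse_search(input, num_letters):
--     multiples = 0
--     for i in input:
--         s = sorted(i)
--         has = False
--         run = 0
--         for k in range(len(s)):
--             run += 1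
--             if k + 1 == len(s) or s[k + 1] != s[k]:
--                 if run == num_letters:
--                     has = True
--                 run = 0
--         multiples += has
--     return multiples
-- ===== Notes on version B (the rewrite author's own statement) =====
-- stated objective: alternative
-- what changed: Replaces the per-string hash-table Counter (and set of its values) with a sort-then-scan: sort the string's characters and detect a run of length num_letters while walking the sorted list with a run counter, no hash structure at all.
import Mathlib
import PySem

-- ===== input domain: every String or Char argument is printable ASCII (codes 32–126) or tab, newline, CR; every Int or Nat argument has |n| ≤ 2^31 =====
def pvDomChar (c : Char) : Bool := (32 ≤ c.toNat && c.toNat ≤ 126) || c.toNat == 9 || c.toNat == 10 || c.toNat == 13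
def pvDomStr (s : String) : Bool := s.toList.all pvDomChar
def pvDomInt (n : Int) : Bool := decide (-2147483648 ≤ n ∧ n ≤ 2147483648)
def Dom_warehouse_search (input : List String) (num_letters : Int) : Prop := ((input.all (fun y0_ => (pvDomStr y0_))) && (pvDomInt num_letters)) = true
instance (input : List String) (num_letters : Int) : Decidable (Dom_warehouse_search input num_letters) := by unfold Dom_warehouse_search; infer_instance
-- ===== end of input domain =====

-- B replaces A's per-string hash-table Counter (and set of its values) with a
-- sort-then-scan: sort the characters and detect a run of length num_letters
-- while walking the sorted list with a run counter (objective: alternative).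

-- ===== PORT A =====
def warehouse_search (input : List String) (num_letters : Int) : Int :=
  input.foldl (fun multiples i =>
    let counter := PySem.Dict.counter i.toList
    let values := PySem.Set.ofList counter.values
    if PySem.Set.contains values num_letters then multiples + 1 else multiples) 0

-- ===== PORT B =====
-- the inner 'for k in range(len(s))' loop of Source B: structural recursion on the
-- sorted character list, carrying the run counter and the 'has' flag; the
-- boundary test 'k+1 == len(s) or s[k+1] != s[k]' is the match on the tail.
def runScan (n : Int) : List Char → Nat → Bool → Bool
  | [], _, has => has
  | c :: rest, run, has =>
    let run' := run + 1
    let boundary : Bool := match rest with | [] => true | c' :: _ => c' != c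
    if boundary then runScan n rest 0 (has || (((run' : Nat) : Int) == n))
    else runScan n rest run' has

def warehouse_search_alt (input : List String) (num_letters : Int) : Int :=
  input.foldl (fun multiples i =>
    let s := PySem.List.sorted i.toList (fun c => c) false   -- sorted(i)
    multiples + (if runScan num_letters s 0 false then 1 else 0)) 0

-- ===== PRECONDITION & SPEC =====
def Spec_warehouse_search (input : List String) (num_letters : Int) (out : Int) : Prop := out = warehouse_search_alt input num_letters
instance (input : List String) (num_letters : Int) (out : Int) : Decidable (Spec_warehouse_search input num_letters out) := by unfold Spec_warehouse_search; infer_instance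

-- ===== CLAIM (what is proved, stated in full; the proofs are below) =====
def Claim_equal_warehouse_search : Prop := ∀ (input : List String) (num_letters : Int), Dom_warehouse_search input num_letters → Spec_warehouse_search input num_letters (warehouse_search input num_letters)

-- ===== LEMMAS AND PROOFS =====

-- A's per-string test (num_letters ∈ set(counter.values())) is "some character count equals n".
lemma flag_eq (cs : List Char) (n : Int) :
    PySem.Set.contains (PySem.Set.ofList (PySem.Dict.counter cs).values) n
      = cs.any (fun c => ((cs.count c : Nat) : Int) == n) := by
  rw [Bool.eq_iff_iff]
  simp only [PySem.Set.contains, PySem.Dict.values, PySem.Dict.items_counter,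
    List.map_map, List.contains_iff_mem, PySem.Set.mem_ofList, List.mem_map,
    List.any_eq_true, beq_iff_eq, Function.comp]

-- The run scan on a sorted list: runs are exactly the per-character counts.
lemma runScan_sorted (n : Int) : ∀ (rest : List Char) (c : Char) (run : Nat) (has : Bool),
    (c :: rest).Pairwise (· ≤ ·) →
    (runScan n (c :: rest) run has = true ↔
      has = true ∨ ((run : Int) + (((c :: rest).count c : Nat) : Int) = n) ∨
        ∃ d ∈ rest, d ≠ c ∧ ((rest.count d : Nat) : Int) = n) := by
  intro rest
  induction rest with
  | nil =>
    intro c run has _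
    simp [runScan]
  | cons c' rest' ih =>
    intro c run has hp
    have hcc' : c ≤ c' := (List.pairwise_cons.mp hp).1 c' (by simp)
    have hp' : (c' :: rest').Pairwise (· ≤ ·) := (List.pairwise_cons.mp hp).2
    by_cases hec : c' = c
    · subst hec
      have hlhs : runScan n (c' :: c' :: rest') run has = runScan n (c' :: rest') (run + 1) has := by
        simp [runScan]
      rw [hlhs, ih c' (run + 1) has hp']
      constructor
      · rintro (h | h | ⟨d, hd, hdc, hcnt⟩)
        · exact Or.inl h
        · refine Or.inr (Or.inl ?_); simp [List.count_cons] at h ⊢; push_cast at h ⊢; omega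
        · exact Or.inr (Or.inr ⟨d, by simp [hd], hdc, by
            simp [List.count_cons, hdc, Ne.symm hdc] at hcnt ⊢; push_cast at hcnt ⊢; omega⟩)
      · rintro (h | h | ⟨d, hd, hdc, hcnt⟩)
        · exact Or.inl h
        · refine Or.inr (Or.inl ?_); simp [List.count_cons] at h ⊢; push_cast at h ⊢; omega
        · refine Or.inr (Or.inr ⟨d, ?_, hdc, ?_⟩)
          · rcases List.mem_cons.mp hd with h1 | h1
            · exact absurd h1 hdc
            · exact h1
          · simp [List.count_cons, hdc, Ne.symm hdc] at hcnt ⊢; push_cast at hcnt ⊢; omega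
    · -- c' ≠ c : a boundary; c never reappears (sorted, c < c')
      have hlt : c < c' := lt_of_le_of_ne hcc' (fun h => hec h.symm)
      have hnotin : c ∉ c' :: rest' := by
        intro hmem
        rcases List.mem_cons.mp hmem with h1 | h1
        · exact hec h1.symm
        · have : c' ≤ c := (List.pairwise_cons.mp hp').1 c h1
          exact absurd (lt_of_lt_of_le hlt this) (lt_irrefl c)
      have hlhs : runScan n (c :: c' :: rest') run has
          = runScan n (c' :: rest') 0 (has || ((((run + 1 : Nat) : Int)) == n)) := by
        simp [runScan, hec]
      rw [hlhs, ih c' 0 (has || ((((run + 1 : Nat) : Int)) == n)) hp']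
      have hcount : (c :: c' :: rest').count c = 1 := by
        simp [List.count_cons, hec, List.count_eq_zero.mpr (fun h => hnotin (List.mem_cons_of_mem _ h))]
      constructor
      · rintro (h | h | ⟨d, hd, hdc', hcnt⟩)
        · rcases Bool.or_eq_true_iff.mp h with h1 | h1
          · exact Or.inl h1
          · refine Or.inr (Or.inl ?_)
            rw [hcount]; have := beq_iff_eq.mp h1; push_cast at this ⊢; omega
        · refine Or.inr (Or.inr ⟨c', by simp, fun h => hec h, by simpa using h⟩)
        · refine Or.inr (Or.inr ⟨d, by simp [hd], ?_, ?_⟩)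
          · intro h; subst h; exact hnotin (List.mem_cons_of_mem _ hd)
          · simp [List.count_cons, hdc', Ne.symm hdc'] at hcnt ⊢; push_cast at hcnt ⊢; omega
      · rintro (h | h | ⟨d, hd, hdc, hcnt⟩)
        · exact Or.inl (by simp [h])
        · refine Or.inl ?_
          rw [hcount] at h
          have : ((run + 1 : Nat) : Int) = n := by push_cast at h ⊢; omega
          simp [this]
        · rcases List.mem_cons.mp hd with h1 | h1
          · subst h1
            refine Or.inr (Or.inl ?_); simpa using hcnt
          · by_cases hdc' : d = c'
            · subst hdc'
              refine Or.inr (Or.inl ?_)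
              simp [List.count_cons] at hcnt ⊢; push_cast at hcnt ⊢; omega
            · refine Or.inr (Or.inr ⟨d, h1, hdc', ?_⟩)
              simp [List.count_cons, hdc', Ne.symm hdc'] at hcnt ⊢; push_cast at hcnt ⊢; omega

-- B's per-string flag equals A's per-string test.
lemma runScan_eq_any (n : Int) (cs : List Char) :
    runScan n (PySem.List.sorted cs (fun c => c) false) 0 false
      = cs.any (fun c => ((cs.count c : Nat) : Int) == n) := by
  have hperm : (PySem.List.sorted cs (fun c => c) false).Perm cs := PySem.List.sorted_perm cs (fun c => c) false
  have hpw : (PySem.List.sorted cs (fun c => c) false).Pairwise (· ≤ ·) := by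
    simpa using (PySem.List.sorted_pairwise (xs := cs) (key := fun c => c))
  rw [Bool.eq_iff_iff]
  cases hs : PySem.List.sorted cs (fun c => c) false with
  | nil =>
    have : cs = [] := by
      have := hperm; rw [hs] at this; exact (List.Perm.nil_eq this).symm
    simp [runScan, this]
  | cons c rest =>
    rw [hs] at hperm hpw
    rw [runScan_sorted n rest c 0 false hpw]
    simp only [List.any_eq_true, beq_iff_eq]
    constructor
    · rintro (h | h | ⟨d, hd, hdc, hcnt⟩)
      · simp at h
      · refine ⟨c, hperm.mem_iff.mp (by simp), ?_⟩
        rw [← hperm.count_eq]; omega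
      · refine ⟨d, hperm.mem_iff.mp (by simp [hd]), ?_⟩
        rw [← hperm.count_eq]
        simp [List.count_cons, hdc, Ne.symm hdc] at hcnt ⊢; push_cast at hcnt ⊢; omega
    · rintro ⟨d, hd, hcnt⟩
      have hdmem : d ∈ c :: rest := hperm.mem_iff.mpr hd
      rw [← hperm.count_eq] at hcnt
      by_cases hdc : d = c
      · subst hdc
        exact Or.inr (Or.inl (by omega))
      · refine Or.inr (Or.inr ⟨d, ?_, hdc, ?_⟩)
        · rcases List.mem_cons.mp hdmem with h1 | h1
          · exact absurd h1 hdc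
          · exact h1
        · simp [List.count_cons, hdc, Ne.symm hdc] at hcnt ⊢; push_cast at hcnt ⊢; omega

-- the two folds agree step by step
lemma fold_eq (n : Int) : ∀ (l : List String) (m : Int),
    l.foldl (fun multiples i =>
      let counter := PySem.Dict.counter i.toList
      let values := PySem.Set.ofList counter.values
      if PySem.Set.contains values n then multiples + 1 else multiples) m
    = l.foldl (fun multiples i =>
      let s := PySem.List.sorted i.toList (fun c => c) false
      multiples + (if runScan n s 0 false then 1 else 0)) m := by
  intro l
  induction l with
  | nil => intro m; rfl
  | cons i t ih =>
    intro m
    have hhead : (if PySem.Set.contains (PySem.Set.ofList (PySem.Dict.counter i.toList).values) n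
          then m + 1 else m)
        = m + (if runScan n (PySem.List.sorted i.toList (fun c => c) false) 0 false then 1 else 0) := by
      rw [flag_eq, ← runScan_eq_any]
      by_cases h : runScan n (PySem.List.sorted i.toList (fun c => c) false) 0 false <;> simp [h]
    show List.foldl _ (if PySem.Set.contains (PySem.Set.ofList (PySem.Dict.counter i.toList).values) n
          then m + 1 else m) t
        = List.foldl _ (m + (if runScan n (PySem.List.sorted i.toList (fun c => c) false) 0 false then 1 else 0)) t
    rw [hhead]
    exact ih _

-- ===== VERDICT (by name: the statement is the Claim_ definition above) =====
theorem warehouse_search_spec : Claim_equal_warehouse_search := by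
  intro input n _
  show warehouse_search input n = warehouse_search_alt input n
  exact fold_eq n input 0
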